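-- pv_equiv track=rewrite | github.com/wangbiu/lpmln_isets | lpmln/experiments/TupleGenerator.py | compute_isets_of_rule
-- ===== SOURCE A (Python) =====
-- def compute_isets_of_rule(rule):
--     isets = list()
--     for flag in range(1, 8):
--         intersect = None
--         union = set()
--         iset_id = bin(flag)[2:]
--         iset_id = "0" * (3 - len(iset_id)) + iset_id
--         for i in range(3):
--             if iset_id[i] == "1":
--                 if intersect is None:
--                     intersect = rule[i]
--                 else:
--                     intersect = intersect.intersection(rule[i])
--             else:
--                 union = union.union(rule[i])
--
--         isets.append(intersect.difference(union))
--
--     return isets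
-- ===== SOURCE B (Python) =====
-- def compute_isets_of_rule(rule):
--     regions = [set() for _ in range(8)]
--     for x in rule[0] | rule[1] | rule[2]:
--         mask = 4 * (x in rule[0]) + 2 * (x in rule[1]) + (x in rule[2])
--         regions[mask].add(x)
--     return regions[1:]
-- ===== Notes on version B (the rewrite author's own statement) =====
-- stated objective: alternative
-- what changed: A computes each of the 7 regions by per-subset set algebra (intersection of the flagged sets minus the union of the others); B makes one pass over the union of the three sets, classifies each element by a 3-bit membership mask, and buckets it into regions[mask], returning regions[1:8].
import Mathlib
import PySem

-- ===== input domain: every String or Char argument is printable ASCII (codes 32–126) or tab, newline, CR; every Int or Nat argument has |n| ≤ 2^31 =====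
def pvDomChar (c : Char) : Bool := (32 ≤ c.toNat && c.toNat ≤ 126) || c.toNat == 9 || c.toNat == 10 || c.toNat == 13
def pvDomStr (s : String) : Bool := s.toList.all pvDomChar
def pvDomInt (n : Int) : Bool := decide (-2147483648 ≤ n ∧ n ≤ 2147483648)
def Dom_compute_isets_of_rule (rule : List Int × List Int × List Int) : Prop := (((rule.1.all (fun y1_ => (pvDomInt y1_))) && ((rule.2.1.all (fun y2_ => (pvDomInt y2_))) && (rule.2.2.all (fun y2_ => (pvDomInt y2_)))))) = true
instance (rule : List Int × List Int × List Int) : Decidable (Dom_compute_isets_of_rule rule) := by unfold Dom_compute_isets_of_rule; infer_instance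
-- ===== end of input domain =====

-- B replaces A's per-subset set algebra (7 intersection/union/difference computations) by a single
-- classify-and-bucket pass over the union: same values, alternative decomposition.
-- The Python arguments are SETS of ints; they are modelled as PySem.Set.ofList of the given lists
-- (insertion-order sets; both ports build lists of sets, so no Python set iteration order is relied on).

-- ===== PORT A =====
-- rule[i] on the 3-tuple (i is always 0, 1 or 2 here)
def pvRuleGet (rule : List Int × List Int × List Int) (i : Int) : PySem.Set Int :=
  if i = 0 then PySem.Set.ofList rule.1
  else if i = 1 then PySem.Set.ofList rule.2.1
  else PySem.Set.ofList rule.2.2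

-- the body of A's 'for flag in range(1, 8)' loop
def pvFlagStep (rule : List Int × List Int × List Int) (flag : Int) : List Int :=
  -- iset_id = bin(flag)[2:]  (exact: PySem.Int.toBinChars0b n = bin(n) as chars)
  let iset_id : List Char := PySem.List.slice (PySem.Int.toBinChars0b flag) (some 2) none
  -- iset_id = "0" * (3 - len(iset_id)) + iset_id
  let iset_id : List Char := List.replicate (3 - iset_id.length) '0' ++ iset_id
  let st := (PySem.List.pyRange 0 3 1).foldl
    (fun (st : Option (PySem.Set Int) × PySem.Set Int) i =>
      if PySem.List.pyGet? iset_id i = some '1' then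
        match st.1 with
        | none => (some (pvRuleGet rule i), st.2)
        | some s => (some (PySem.Set.inter s (pvRuleGet rule i)), st.2)
      else (st.1, PySem.Set.union st.2 (pvRuleGet rule i)))
    (none, PySem.Set.empty)
  -- intersect.difference(union); intersect is never None since every flag in 1..7 has a '1' bit
  PySem.Set.diff (st.1.getD PySem.Set.empty) st.2

def compute_isets_of_rule (rule : List Int × List Int × List Int) : List (List Int) :=
  (PySem.List.pyRange 1 8 1).foldl (fun isets flag => isets ++ [pvFlagStep rule flag]) []

-- ===== PORT B =====
def compute_isets_of_rule_alt (rule : List Int × List Int × List Int) : List (List Int) :=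
  let s0 := PySem.Set.ofList rule.1
  let s1 := PySem.Set.ofList rule.2.1
  let s2 := PySem.Set.ofList rule.2.2
  -- regions = [set() for _ in range(8)]
  let regions : List (PySem.Set Int) := (List.range 8).map (fun _ => PySem.Set.empty)
  -- for x in rule[0] | rule[1] | rule[2]: regions[mask].add(x)   (the buckets are sets, so the
  -- result does not depend on the Python set's iteration order)
  let regions := (PySem.Set.union (PySem.Set.union s0 s1) s2).foldl
    (fun rs x =>
      let mask : Int := 4 * (if s0.contains x then 1 else 0)
                      + 2 * (if s1.contains x then 1 else 0)
                      + (if s2.contains x then 1 else 0)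
      PySem.List.pySetD rs mask (PySem.Set.add (PySem.List.pyGetD rs mask PySem.Set.empty) x))
    regions
  -- return regions[1:]
  PySem.List.slice regions (some 1) none

-- ===== PRECONDITION & SPEC =====
def Spec_compute_isets_of_rule (rule : List Int × List Int × List Int) (out : List (List Int)) : Prop := out = compute_isets_of_rule_alt rule
instance (rule : List Int × List Int × List Int) (out : List (List Int)) : Decidable (Spec_compute_isets_of_rule rule out) := by unfold Spec_compute_isets_of_rule; infer_instance

-- ===== CLAIM (what is proved, stated in full; the proofs are below) =====
def Claim_equal_compute_isets_of_rule : Prop := ∀ (rule : List Int × List Int × List Int), Dom_compute_isets_of_rule rule → Spec_compute_isets_of_rule rule (compute_isets_of_rule rule)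

-- ===== LEMMAS AND PROOFS =====

-- B's membership mask, written out (used only by the proofs)
def pvM (r0 r1 r2 : List Int) (x : Int) : Int :=
  4 * (if (PySem.Set.ofList r0).contains x then 1 else 0)
  + 2 * (if (PySem.Set.ofList r1).contains x then 1 else 0)
  + (if (PySem.Set.ofList r2).contains x then 1 else 0)

theorem pv_contains_ofList (l : List Int) (x : Int) :
    (PySem.Set.ofList l).contains x = decide (x ∈ l) := by
  simp [PySem.Set.contains]

theorem pvM_bounds (r0 r1 r2 : List Int) : ∀ x, 0 ≤ pvM r0 r1 r2 x ∧ pvM r0 r1 r2 x < 8 := by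
  intro x
  unfold pvM
  split_ifs <;> norm_num

theorem pv_update_ofList (s ys : List Int) :
    PySem.Set.update s (PySem.Set.ofList ys) = PySem.Set.update s ys := by
  rw [PySem.Set.update_eq_append_filter, PySem.Set.update_eq_append_filter,
    PySem.Set.ofList_ofList]

theorem pv_union_ofList (xs ys : List Int) :
    PySem.Set.union (PySem.Set.ofList xs) (PySem.Set.ofList ys) = PySem.Set.ofList (xs ++ ys) := by
  show PySem.Set.update (PySem.Set.ofList xs) (PySem.Set.ofList ys) = _
  rw [pv_update_ofList, ← PySem.Set.ofList_append]

theorem pv_union_empty (ys : List Int) :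
    PySem.Set.union PySem.Set.empty (PySem.Set.ofList ys) = PySem.Set.ofList ys := by
  show PySem.Set.update ([] : List Int) (PySem.Set.ofList ys) = _
  rw [PySem.Set.update_nil_left, PySem.Set.ofList_ofList]

-- filtering the dedup of an append, when the predicate pins the side
theorem pv_filter_ofList_append_right (xs ys : List Int) (p : Int → Bool)
    (h : ∀ x, p x = true → x ∈ xs) :
    (PySem.Set.ofList (xs ++ ys)).filter p = (PySem.Set.ofList xs).filter p := by
  rw [PySem.Set.ofList_append, PySem.Set.update_eq_append_filter, List.filter_append]
  have hnil : ((PySem.Set.ofList ys).filter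
      (fun y => !(PySem.Set.ofList xs).contains y)).filter p = [] := by
    rw [List.filter_eq_nil_iff]
    intro a ha hpa
    have ha2 := List.of_mem_filter ha
    simp only [pv_contains_ofList] at ha2
    simp only [Bool.not_eq_eq_eq_not, Bool.not_true, decide_eq_false_iff_not] at ha2
    exact ha2 (h a hpa)
  rw [hnil, List.append_nil]

theorem pv_filter_ofList_append_left (xs ys : List Int) (p : Int → Bool)
    (h : ∀ x, p x = true → x ∉ xs) :
    (PySem.Set.ofList (xs ++ ys)).filter p = (PySem.Set.ofList ys).filter p := by
  rw [PySem.Set.ofList_append, PySem.Set.update_eq_append_filter, List.filter_append]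
  have hnil : (PySem.Set.ofList xs).filter p = [] := by
    rw [List.filter_eq_nil_iff]
    intro a ha hpa
    exact h a hpa ((PySem.Set.mem_ofList _ _).mp ha)
  rw [hnil, List.nil_append, List.filter_filter]
  apply List.filter_congr
  intro z _
  by_cases hp : p z = true
  · have := h z hp
    simp only [pv_contains_ofList]
    simp [hp, this]
  · simp only [Bool.not_eq_true] at hp
    simp [hp]

-- writing one bucket of the range-map
theorem pv_set_map_range {β : Type} (g : Nat → β) (n j : Nat) (v : β) (_hj : j < n) :
    ((List.range n).map g).set j v = (List.range n).map (fun k => if k = j then v else g k) := by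
  apply List.ext_getElem
  · simp
  · intro i h1 h2
    simp only [List.length_map, List.length_range] at h1 h2
    rw [List.getElem_set]
    by_cases hij : j = i
    · subst hij
      simp
    · rw [if_neg hij]
      have : i ≠ j := fun h => hij h.symm
      simp [this]

-- the bucket loop computes the eight filters
theorem pv_buckets (f : Int → Int) (hf : ∀ x, 0 ≤ f x ∧ f x < 8) :
    ∀ (ts pre : List Int), ts.Nodup → (∀ x ∈ ts, x ∉ pre) →
    ts.foldl (fun rs x => PySem.List.pySetD rs (f x)
        (PySem.Set.add (PySem.List.pyGetD rs (f x) PySem.Set.empty) x))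
      ((List.range 8).map (fun (k : Nat) => pre.filter (fun x => f x == ((k : Nat) : Int))))
    = (List.range 8).map (fun (k : Nat) => (pre ++ ts).filter (fun x => f x == ((k : Nat) : Int))) := by
  intro ts
  induction ts with
  | nil => intro pre _ _; simp
  | cons x ts ih =>
    intro pre hnd hdisj
    have h0 : (0:Int) ≤ f x := (hf x).1
    have h8 : f x < 8 := (hf x).2
    have hj : (f x).toNat < 8 := by omega
    have hcast : ((f x).toNat : Int) = f x := Int.toNat_of_nonneg h0
    rw [List.foldl_cons, PySem.List.pyGetD_of_nonneg _ _ h0, PySem.List.pySetD_of_nonneg _ _ h0,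
      PySem.List.getD_map_range _ _ _ _ hj]
    have hxpre : x ∉ pre := hdisj x List.mem_cons_self
    have hxbucket : x ∉ pre.filter (fun z => f z == ((f x).toNat : Int)) :=
      fun hm => hxpre (List.mem_of_mem_filter hm)
    have hadd : PySem.Set.add (pre.filter (fun z => f z == ((f x).toNat : Int))) x
        = pre.filter (fun z => f z == ((f x).toNat : Int)) ++ [x] := by
      unfold PySem.Set.add
      exact if_neg (fun hc => hxbucket ((PySem.Set.contains_iff _ _).mp hc))
    rw [hadd, pv_set_map_range _ _ _ _ hj]
    have hmap : (List.range 8).map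
        (fun (k : Nat) => if k = (f x).toNat then pre.filter (fun z => f z == ((f x).toNat : Int)) ++ [x]
                  else pre.filter (fun z => f z == ((k : Nat) : Int)))
        = (List.range 8).map (fun (k : Nat) => (pre ++ [x]).filter (fun z => f z == ((k : Nat) : Int))) := by
      apply List.map_congr_left
      intro k _
      by_cases hk : k = (f x).toNat
      · subst hk
        rw [if_pos rfl, List.filter_append]
        congr 1
        simp [hcast]
      · rw [if_neg hk, List.filter_append]
        have : (f x == (k : Int)) = false := by
          simp only [beq_eq_false_iff_ne, ne_eq]
          intro hc
          apply hk
          omega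
        simp [this]
    rw [hmap, ih (pre ++ [x]) (List.nodup_cons.mp hnd).2 ?_]
    · simp
    · intro y hy
      simp only [List.mem_append, List.mem_singleton]
      rintro (hc | hc)
      · exact hdisj y (List.mem_cons_of_mem _ hy) hc
      · subst hc
        exact (List.nodup_cons.mp hnd).1 hy

theorem pv_buckets0 (f : Int → Int) (hf : ∀ x, 0 ≤ f x ∧ f x < 8) (ts : List Int)
    (h : ts.Nodup) :
    ts.foldl (fun rs x => PySem.List.pySetD rs (f x)
        (PySem.Set.add (PySem.List.pyGetD rs (f x) PySem.Set.empty) x))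
      ((List.range 8).map (fun _ => PySem.Set.empty))
    = (List.range 8).map (fun (k : Nat) => ts.filter (fun x => f x == ((k : Nat) : Int))) := by
  have := pv_buckets f hf ts [] h (by simp)
  simpa [PySem.Set.empty] using this

-- A's seven loop iterations, evaluated
theorem pv_A_eq (r0 r1 r2 : List Int) :
    compute_isets_of_rule (r0, r1, r2)
      = [pvFlagStep (r0, r1, r2) 1, pvFlagStep (r0, r1, r2) 2, pvFlagStep (r0, r1, r2) 3,
         pvFlagStep (r0, r1, r2) 4, pvFlagStep (r0, r1, r2) 5, pvFlagStep (r0, r1, r2) 6,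
         pvFlagStep (r0, r1, r2) 7] := by
  have h : PySem.List.pyRange 1 8 1 = [1,2,3,4,5,6,7] := by decide
  unfold compute_isets_of_rule
  rw [h]
  rfl

-- the seven flag bodies as set algebra
theorem pv_step1 (r0 r1 r2 : List Int) :
    pvFlagStep (r0, r1, r2) 1 = PySem.Set.diff (PySem.Set.ofList r2)
      (PySem.Set.union (PySem.Set.union PySem.Set.empty (PySem.Set.ofList r0)) (PySem.Set.ofList r1)) := rfl
theorem pv_step2 (r0 r1 r2 : List Int) :
    pvFlagStep (r0, r1, r2) 2 = PySem.Set.diff (PySem.Set.ofList r1)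
      (PySem.Set.union (PySem.Set.union PySem.Set.empty (PySem.Set.ofList r0)) (PySem.Set.ofList r2)) := rfl
theorem pv_step3 (r0 r1 r2 : List Int) :
    pvFlagStep (r0, r1, r2) 3 = PySem.Set.diff (PySem.Set.inter (PySem.Set.ofList r1) (PySem.Set.ofList r2))
      (PySem.Set.union PySem.Set.empty (PySem.Set.ofList r0)) := rfl
theorem pv_step4 (r0 r1 r2 : List Int) :
    pvFlagStep (r0, r1, r2) 4 = PySem.Set.diff (PySem.Set.ofList r0)
      (PySem.Set.union (PySem.Set.union PySem.Set.empty (PySem.Set.ofList r1)) (PySem.Set.ofList r2)) := rfl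
theorem pv_step5 (r0 r1 r2 : List Int) :
    pvFlagStep (r0, r1, r2) 5 = PySem.Set.diff (PySem.Set.inter (PySem.Set.ofList r0) (PySem.Set.ofList r2))
      (PySem.Set.union PySem.Set.empty (PySem.Set.ofList r1)) := rfl
theorem pv_step6 (r0 r1 r2 : List Int) :
    pvFlagStep (r0, r1, r2) 6 = PySem.Set.diff (PySem.Set.inter (PySem.Set.ofList r0) (PySem.Set.ofList r1))
      (PySem.Set.union PySem.Set.empty (PySem.Set.ofList r2)) := rfl
theorem pv_step7 (r0 r1 r2 : List Int) :
    pvFlagStep (r0, r1, r2) 7 = PySem.Set.diff (PySem.Set.inter (PySem.Set.inter (PySem.Set.ofList r0) (PySem.Set.ofList r1)) (PySem.Set.ofList r2))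
      PySem.Set.empty := rfl

-- B evaluated to the seven mask filters over the deduplicated concatenation
theorem pv_B_eq (r0 r1 r2 : List Int) :
    compute_isets_of_rule_alt (r0, r1, r2)
      = [(PySem.Set.ofList (r0 ++ (r1 ++ r2))).filter (fun x => pvM r0 r1 r2 x == (1 : Int)),
         (PySem.Set.ofList (r0 ++ (r1 ++ r2))).filter (fun x => pvM r0 r1 r2 x == (2 : Int)),
         (PySem.Set.ofList (r0 ++ (r1 ++ r2))).filter (fun x => pvM r0 r1 r2 x == (3 : Int)),
         (PySem.Set.ofList (r0 ++ (r1 ++ r2))).filter (fun x => pvM r0 r1 r2 x == (4 : Int)),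
         (PySem.Set.ofList (r0 ++ (r1 ++ r2))).filter (fun x => pvM r0 r1 r2 x == (5 : Int)),
         (PySem.Set.ofList (r0 ++ (r1 ++ r2))).filter (fun x => pvM r0 r1 r2 x == (6 : Int)),
         (PySem.Set.ofList (r0 ++ (r1 ++ r2))).filter (fun x => pvM r0 r1 r2 x == (7 : Int))] := by
  have h1 : compute_isets_of_rule_alt (r0, r1, r2) = PySem.List.slice
      (((PySem.Set.union (PySem.Set.union (PySem.Set.ofList r0) (PySem.Set.ofList r1)) (PySem.Set.ofList r2))).foldl
        (fun rs x => PySem.List.pySetD rs (pvM r0 r1 r2 x)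
          (PySem.Set.add (PySem.List.pyGetD rs (pvM r0 r1 r2 x) PySem.Set.empty) x))
        ((List.range 8).map (fun _ => PySem.Set.empty))) (some 1) none := rfl
  rw [h1, pv_union_ofList, pv_union_ofList, List.append_assoc,
    pv_buckets0 (pvM r0 r1 r2) (pvM_bounds r0 r1 r2) _ (PySem.Set.nodup_ofList _),
    PySem.List.slice_from_one]
  norm_num [List.range_succ]

-- the seven componentwise identities
theorem pv_flag1 (r0 r1 r2 : List Int) :
    (PySem.Set.ofList (r0 ++ (r1 ++ r2))).filter (fun x => pvM r0 r1 r2 x == (1 : Int))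
      = PySem.Set.diff (PySem.Set.ofList r2)
          (PySem.Set.union (PySem.Set.union PySem.Set.empty (PySem.Set.ofList r0)) (PySem.Set.ofList r1)) := by
  rw [pv_union_empty, pv_union_ofList]
  rw [pv_filter_ofList_append_left]
  · rw [pv_filter_ofList_append_left]
    · show _ = (PySem.Set.ofList r2).filter _
      apply List.filter_congr
      intro x hx
      have hx2 : x ∈ r2 := (PySem.Set.mem_ofList _ _).mp hx
      unfold pvM
      simp only [pv_contains_ofList]
      by_cases b0 : x ∈ r0 <;> by_cases b1 : x ∈ r1 <;>
        simp [b0, b1, hx2]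
    · intro x hx
      unfold pvM at hx
      simp only [pv_contains_ofList] at hx
      by_cases b0 : x ∈ r0 <;> by_cases b1 : x ∈ r1 <;> by_cases b2 : x ∈ r2 <;>
        simp [b0, b1, b2] at hx ⊢
  · intro x hx
    unfold pvM at hx
    simp only [pv_contains_ofList] at hx
    by_cases b0 : x ∈ r0 <;> by_cases b1 : x ∈ r1 <;> by_cases b2 : x ∈ r2 <;>
      simp [b0, b1, b2] at hx ⊢
theorem pv_flag2 (r0 r1 r2 : List Int) :
    (PySem.Set.ofList (r0 ++ (r1 ++ r2))).filter (fun x => pvM r0 r1 r2 x == (2 : Int))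
      = PySem.Set.diff (PySem.Set.ofList r1)
          (PySem.Set.union (PySem.Set.union PySem.Set.empty (PySem.Set.ofList r0)) (PySem.Set.ofList r2)) := by
  rw [pv_union_empty, pv_union_ofList]
  rw [pv_filter_ofList_append_left]
  · rw [pv_filter_ofList_append_right]
    · apply List.filter_congr
      intro x hx
      have hx1 : x ∈ r1 := (PySem.Set.mem_ofList _ _).mp hx
      unfold pvM
      simp only [pv_contains_ofList]
      by_cases b0 : x ∈ r0 <;> by_cases b2 : x ∈ r2 <;>
        simp [b0, hx1, b2]
    · intro x hx
      unfold pvM at hx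
      simp only [pv_contains_ofList] at hx
      by_cases b0 : x ∈ r0 <;> by_cases b1 : x ∈ r1 <;> by_cases b2 : x ∈ r2 <;>
        simp [b0, b1, b2] at hx ⊢
  · intro x hx
    unfold pvM at hx
    simp only [pv_contains_ofList] at hx
    by_cases b0 : x ∈ r0 <;> by_cases b1 : x ∈ r1 <;> by_cases b2 : x ∈ r2 <;>
      simp [b0, b1, b2] at hx ⊢
theorem pv_flag3 (r0 r1 r2 : List Int) :
    (PySem.Set.ofList (r0 ++ (r1 ++ r2))).filter (fun x => pvM r0 r1 r2 x == (3 : Int))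
      = PySem.Set.diff (PySem.Set.inter (PySem.Set.ofList r1) (PySem.Set.ofList r2))
          (PySem.Set.union PySem.Set.empty (PySem.Set.ofList r0)) := by
  rw [pv_union_empty]
  rw [pv_filter_ofList_append_left]
  · rw [pv_filter_ofList_append_right]
    · show _ = ((PySem.Set.ofList r1).filter _).filter _
      rw [List.filter_filter]
      apply List.filter_congr
      intro x hx
      have hx1 : x ∈ r1 := (PySem.Set.mem_ofList _ _).mp hx
      unfold pvM
      simp only [pv_contains_ofList]
      by_cases b0 : x ∈ r0 <;> by_cases b2 : x ∈ r2 <;>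
        simp [b0, hx1, b2]
    · intro x hx
      unfold pvM at hx
      simp only [pv_contains_ofList] at hx
      by_cases b0 : x ∈ r0 <;> by_cases b1 : x ∈ r1 <;> by_cases b2 : x ∈ r2 <;>
        simp [b0, b1, b2] at hx ⊢
  · intro x hx
    unfold pvM at hx
    simp only [pv_contains_ofList] at hx
    by_cases b0 : x ∈ r0 <;> by_cases b1 : x ∈ r1 <;> by_cases b2 : x ∈ r2 <;>
      simp [b0, b1, b2] at hx ⊢
theorem pv_flag4 (r0 r1 r2 : List Int) :
    (PySem.Set.ofList (r0 ++ (r1 ++ r2))).filter (fun x => pvM r0 r1 r2 x == (4 : Int))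
      = PySem.Set.diff (PySem.Set.ofList r0)
          (PySem.Set.union (PySem.Set.union PySem.Set.empty (PySem.Set.ofList r1)) (PySem.Set.ofList r2)) := by
  rw [pv_union_empty, pv_union_ofList]
  rw [pv_filter_ofList_append_right]
  · apply List.filter_congr
    intro x hx
    have hx0 : x ∈ r0 := (PySem.Set.mem_ofList _ _).mp hx
    unfold pvM
    simp only [pv_contains_ofList]
    by_cases b1 : x ∈ r1 <;> by_cases b2 : x ∈ r2 <;>
      simp [hx0, b1, b2]
  · intro x hx
    unfold pvM at hx
    simp only [pv_contains_ofList] at hx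
    by_cases b0 : x ∈ r0 <;> by_cases b1 : x ∈ r1 <;> by_cases b2 : x ∈ r2 <;>
      simp [b0, b1, b2] at hx ⊢
theorem pv_flag5 (r0 r1 r2 : List Int) :
    (PySem.Set.ofList (r0 ++ (r1 ++ r2))).filter (fun x => pvM r0 r1 r2 x == (5 : Int))
      = PySem.Set.diff (PySem.Set.inter (PySem.Set.ofList r0) (PySem.Set.ofList r2))
          (PySem.Set.union PySem.Set.empty (PySem.Set.ofList r1)) := by
  rw [pv_union_empty]
  rw [pv_filter_ofList_append_right]
  · show _ = ((PySem.Set.ofList r0).filter _).filter _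
    rw [List.filter_filter]
    apply List.filter_congr
    intro x hx
    have hx0 : x ∈ r0 := (PySem.Set.mem_ofList _ _).mp hx
    unfold pvM
    simp only [pv_contains_ofList]
    by_cases b1 : x ∈ r1 <;> by_cases b2 : x ∈ r2 <;>
      simp [hx0, b1, b2]
  · intro x hx
    unfold pvM at hx
    simp only [pv_contains_ofList] at hx
    by_cases b0 : x ∈ r0 <;> by_cases b1 : x ∈ r1 <;> by_cases b2 : x ∈ r2 <;>
      simp [b0, b1, b2] at hx ⊢
theorem pv_flag6 (r0 r1 r2 : List Int) :
    (PySem.Set.ofList (r0 ++ (r1 ++ r2))).filter (fun x => pvM r0 r1 r2 x == (6 : Int))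
      = PySem.Set.diff (PySem.Set.inter (PySem.Set.ofList r0) (PySem.Set.ofList r1))
          (PySem.Set.union PySem.Set.empty (PySem.Set.ofList r2)) := by
  rw [pv_union_empty]
  rw [pv_filter_ofList_append_right]
  · show _ = ((PySem.Set.ofList r0).filter _).filter _
    rw [List.filter_filter]
    apply List.filter_congr
    intro x hx
    have hx0 : x ∈ r0 := (PySem.Set.mem_ofList _ _).mp hx
    unfold pvM
    simp only [pv_contains_ofList]
    by_cases b1 : x ∈ r1 <;> by_cases b2 : x ∈ r2 <;>
      simp [hx0, b1, b2]
  · intro x hx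
    unfold pvM at hx
    simp only [pv_contains_ofList] at hx
    by_cases b0 : x ∈ r0 <;> by_cases b1 : x ∈ r1 <;> by_cases b2 : x ∈ r2 <;>
      simp [b0, b1, b2] at hx ⊢
theorem pv_flag7 (r0 r1 r2 : List Int) :
    (PySem.Set.ofList (r0 ++ (r1 ++ r2))).filter (fun x => pvM r0 r1 r2 x == (7 : Int))
      = PySem.Set.diff (PySem.Set.inter (PySem.Set.inter (PySem.Set.ofList r0) (PySem.Set.ofList r1)) (PySem.Set.ofList r2))
          PySem.Set.empty := by
  rw [pv_filter_ofList_append_right]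
  · show _ = ((((PySem.Set.ofList r0).filter _).filter _).filter _)
    rw [List.filter_filter, List.filter_filter]
    apply List.filter_congr
    intro x hx
    have hx0 : x ∈ r0 := (PySem.Set.mem_ofList _ _).mp hx
    unfold pvM
    simp only [pv_contains_ofList]
    by_cases b1 : x ∈ r1 <;> by_cases b2 : x ∈ r2 <;>
      simp [hx0, b1, b2, PySem.Set.empty, PySem.Set.contains]
  · intro x hx
    unfold pvM at hx
    simp only [pv_contains_ofList] at hx
    by_cases b0 : x ∈ r0 <;> by_cases b1 : x ∈ r1 <;> by_cases b2 : x ∈ r2 <;>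
      simp [b0, b1, b2] at hx ⊢

-- ===== VERDICT (by name: the statement is the Claim_ definition above) =====
theorem compute_isets_of_rule_spec : Claim_equal_compute_isets_of_rule := by
  intro rule _
  obtain ⟨r0, r1, r2⟩ := rule
  show compute_isets_of_rule (r0, r1, r2) = compute_isets_of_rule_alt (r0, r1, r2)
  rw [pv_A_eq, pv_B_eq, pv_flag1, pv_flag2, pv_flag3, pv_flag4, pv_flag5, pv_flag6, pv_flag7,
    pv_step1, pv_step2, pv_step3, pv_step4, pv_step5, pv_step6, pv_step7]
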